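-- pv_equiv track=rewrite | github.com/mofosyne/arduino-gameboy-printer-emulator | GameboyPrinterDecoderPython/gbp/gbpparser.py | harmonize_palette
-- ===== SOURCE A (Python) =====
-- def decode_2BPP(bh, bl):
--     return [(((bh >> 7 - i) & 0x1) << 1) | ((bl >> 7 - i) & 0x1)
--             for i in range(0, 8)]
--
-- def harmonize_palette(bl, bh, paletteDefinition=[3, 2, 1, 0]):
--     row = decode_2BPP(bh, bl)
--     row = [paletteDefinition[3 - val] for val in row]
--
--     a = 0
--     b = 0
--     for idx, val in enumerate(row):
--         a += (val >> 1) << 7 - idx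
--         b += (val & 1) << 7 - idx
--
--     return (a & 0xff, b & 0xff)
-- ===== SOURCE B (Python) =====
-- def harmonize_palette(bl, bh, paletteDefinition=[3, 2, 1, 0]):
--     # Single fused LSB-first pass: consume one bit of each plane per step,
--     # look up the remapped colour, and accumulate both output planes directly.
--     a = 0
--     b = 0
--     h = bh
--     l = bl
--     for k in range(8):
--         val = paletteDefinition[3 - (((h & 1) << 1) | (l & 1))]
--         a += (val >> 1) << k
--         b += (val & 1) << k
--         h >>= 1
--         l >>= 1
--     return (a & 0xff, b & 0xff)
-- ===== Notes on version B (the rewrite author's own statement) =====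
-- stated objective: simpler
-- what changed: Replaces the decode_2BPP helper, the two intermediate list comprehensions and the enumerate repack loop by one fused LSB-first loop that shifts both planes right one bit per step and accumulates both outputs directly, with no intermediate lists.
import Mathlib
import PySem

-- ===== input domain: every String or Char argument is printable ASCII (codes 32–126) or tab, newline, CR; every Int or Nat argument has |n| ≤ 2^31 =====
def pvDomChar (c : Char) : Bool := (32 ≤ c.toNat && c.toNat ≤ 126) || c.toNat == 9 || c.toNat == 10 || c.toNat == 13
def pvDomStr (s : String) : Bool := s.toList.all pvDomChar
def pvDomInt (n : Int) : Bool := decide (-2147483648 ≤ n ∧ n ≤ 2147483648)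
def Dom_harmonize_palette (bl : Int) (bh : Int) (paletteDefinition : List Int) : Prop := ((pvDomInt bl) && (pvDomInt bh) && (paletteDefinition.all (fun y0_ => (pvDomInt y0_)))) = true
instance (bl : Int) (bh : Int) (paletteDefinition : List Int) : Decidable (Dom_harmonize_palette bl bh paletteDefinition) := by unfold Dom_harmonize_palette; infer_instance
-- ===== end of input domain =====

-- B fuses A's three passes (decode, palette remap, repack) into one LSB-first loop with no
-- intermediate lists; same return value everywhere A returns (objective: simpler).

-- ===== PORT A =====
-- decode_2BPP(bh, bl): list comprehension over range(0, 8)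
def decode_2BPP (bh : Int) (bl : Int) : List Int :=
  (PySem.List.pyRange 0 8 1).map (fun i =>
    PySem.Int.bor ((PySem.Int.band (bh >>> (7 - i).toNat) 1) <<< 1)
                  (PySem.Int.band (bl >>> (7 - i).toNat) 1))

def harmonize_palette (bl : Int) (bh : Int) (paletteDefinition : List Int) : Int × Int :=
  let row := decode_2BPP bh bl
  -- paletteDefinition[3 - val]; none = IndexError, excluded by Pre_ (default 0 never used there)
  let row2 := row.map (fun val => (PySem.List.pyGet? paletteDefinition (3 - val)).getD 0)
  let ab := (PySem.List.enumerate row2).foldl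
    (fun (ab : Int × Int) (p : Int × Int) =>
      (ab.1 + (p.2 >>> 1) <<< (7 - p.1).toNat, ab.2 + (PySem.Int.band p.2 1) <<< (7 - p.1).toNat))
    (0, 0)
  (PySem.Int.band ab.1 255, PySem.Int.band ab.2 255)

-- ===== PORT B =====
def harmonize_palette_alt (bl : Int) (bh : Int) (paletteDefinition : List Int) : Int × Int :=
  let st := (List.range 8).foldl
    (fun (st : Int × Int × Int × Int) (k : Nat) =>
      let h := st.1; let l := st.2.1; let a := st.2.2.1; let b := st.2.2.2
      -- paletteDefinition[3 - (((h & 1) << 1) | (l & 1))]; none = IndexError, excluded by Pre_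
      let val := (PySem.List.pyGet? paletteDefinition
        (3 - PySem.Int.bor ((PySem.Int.band h 1) <<< 1) (PySem.Int.band l 1))).getD 0
      (h >>> (1:Nat), l >>> (1:Nat), a + (val >>> 1) <<< k, b + (PySem.Int.band val 1) <<< k))
    (bh, bl, 0, 0)
  (PySem.Int.band st.2.2.1 255, PySem.Int.band st.2.2.2 255)

-- ===== PRECONDITION & SPEC =====
-- Pre_: each palette index actually accessed (3 - pixel code, per bit position) is in range;
-- outside it Python A (and B) raise IndexError.
def Pre_harmonize_palette (bl : Int) (bh : Int) (paletteDefinition : List Int) : Prop :=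
  ∀ k ∈ List.range 8,
    PySem.Raise.InRange paletteDefinition.length
      (3 - PySem.Int.bor ((PySem.Int.band (bh >>> k) 1) <<< 1) (PySem.Int.band (bl >>> k) 1))
instance (bl : Int) (bh : Int) (paletteDefinition : List Int) : Decidable (Pre_harmonize_palette bl bh paletteDefinition) := by unfold Pre_harmonize_palette; infer_instance

def pvWitness_harmonize_palette : Int × Int × List Int := (0, 0, [3, 2, 1, 0])

def Spec_harmonize_palette (bl : Int) (bh : Int) (paletteDefinition : List Int) (out : Int × Int) : Prop := out = harmonize_palette_alt bl bh paletteDefinition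
instance (bl : Int) (bh : Int) (paletteDefinition : List Int) (out : Int × Int) : Decidable (Spec_harmonize_palette bl bh paletteDefinition out) := by unfold Spec_harmonize_palette; infer_instance

-- ===== CLAIM (what is proved, stated in full; the proofs are below) =====
def Claim_equal_harmonize_palette : Prop := ∀ (bl : Int) (bh : Int) (paletteDefinition : List Int), Dom_harmonize_palette bl bh paletteDefinition → Pre_harmonize_palette bl bh paletteDefinition → Spec_harmonize_palette bl bh paletteDefinition (harmonize_palette bl bh paletteDefinition)

-- ===== LEMMAS AND PROOFS =====
-- ===== VERDICT (by name: the statement is the Claim_ definition above) =====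
theorem harmonize_palette_spec : Claim_equal_harmonize_palette := by
  intro bl bh p _ _
  unfold Spec_harmonize_palette harmonize_palette harmonize_palette_alt decode_2BPP
  rw [show PySem.List.pyRange 0 8 1 = [0,1,2,3,4,5,6,7] from by decide,
      show List.range 8 = [0,1,2,3,4,5,6,7] from rfl]
  norm_num [PySem.List.enumerate, ← Int.shiftRight_add,
    show Int.toNat 0 = 0 from rfl, show Int.toNat 1 = 1 from rfl, show Int.toNat 2 = 2 from rfl, show Int.toNat 3 = 3 from rfl,
    show Int.toNat 4 = 4 from rfl, show Int.toNat 5 = 5 from rfl, show Int.toNat 6 = 6 from rfl,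
    show Int.toNat 7 = 7 from rfl, Int.shiftRight_zero]
  have h0 : ∀ n : Int, n >>> (0:Int) = n := fun n => by
    rw [show (0:Int) = ((0:Nat):Int) from rfl, Int.shiftRight_natCast_right]
    exact Int.shiftRight_zero n
  rw [h0 bh, h0 bl]
  simp only [Int.shiftLeft_eq, ← Int.shiftRight_natCast_right]
  norm_num
  constructor <;> (congr 1; ring)
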